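-- pv_equiv track=rewrite | github.com/tyehle/word-finder | cheat_codes.py | find_trie
-- ===== SOURCE A (Python) =====
-- import collections
-- from dataclasses import dataclass
-- from typing import Dict, Iterable, List, Optional
--
-- @dataclass
-- class Trie:
--     word: Optional[str]
--     children: Dict[str, "Trie"]
--
-- def trie_from_list(words: Iterable[str]) -> Trie:
--     out = Trie(None, dict())
--     for word in words:
--         current = out
--         for letter in word:
--             if letter not in current.children:
--                 current.children[letter] = Trie(None, dict())
--             current = current.children[letter]
--         current.word = word
--     return out
--
-- def remove_bag(bag: Dict[str, int], e: str) -> Dict[str, int]: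
--     """Return a copy of a bag with one element removed.
--
--     Args:
--         bag: The bag to copy
--         e: The element to remove
--
--     Raises:
--         ValueError: If the element is not in the bag
--     """
--     if e not in bag:
--         raise ValueError(f"Cannot remove {e} from {bag}")
--     out = bag.copy()
--     if out[e] == 1:
--         out.pop(e)
--     else:
--         out[e] -= 1
--     return out
--
-- def find_trie(words: Iterable[str], letters: Iterable[str]) -> List[str]:
--     def rec(trie: Trie, chosen: str, remaining: Dict[str, int]) -> List[str]:
--         """Recursively search for words in a trie.
--
--         Args:
--             trie: The trie to search
--             chosen: Letters to traverse in the trie before expanding the search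
--                 from the remaining set
--             remaining: Bag of remaining letters to search over
--
--         Returns:
--             The list of all words that matched
--         """
--         if chosen:
--             if chosen[0] == ".":
--                 return [
--                     word
--                     for child in trie.children.values()
--                     for word in rec(child, chosen[1:], remaining)
--                 ]
--             elif chosen[0] in trie.children:
--                 return rec(trie.children[chosen[0]], chosen[1:], remaining)
--             else:
--                 return []
--
--         out = []
--
--         if trie.word is not None:
--             out.append(trie.word)
--
--         if remaining:
--             for letters in remaining:
--                 out.extend(rec(trie, letters, remove_bag(remaining, letters)))
--
--         return out
--
--     trie = trie_from_list(words)
--     return rec(trie, "", dict(collections.Counter(letters)))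
-- ===== SOURCE B (Python) =====
-- import collections
--
--
-- def find_trie(words, letters):
--     # Build the trie as [word, children] nodes.
--     root = [None, {}]
--     for w in words:
--         node = root
--         for ch in w:
--             node = node[1].setdefault(ch, [None, {}])
--         node[0] = w
--
--     def descend(nodes, s):
--         """All nodes reached from `nodes` by following the string s ('.' = any child)."""
--         for ch in s:
--             if ch == ".":
--                 nodes = [c for n in nodes for c in n[1].values()]
--             else:
--                 nodes = [n[1][ch] for n in nodes if ch in n[1]]
--         return nodes
--
--     def rec(node, bag):
--         out = [node[0]] if node[0] is not None else []
--         for s in bag: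
--             rest = dict(bag)
--             if rest[s] == 1:
--                 del rest[s]
--             else:
--                 rest[s] -= 1
--             for n in descend([node], s):
--                 out.extend(rec(n, rest))
--         return out
--
--     return rec(root, dict(collections.Counter(letters)))
-- ===== Notes on version B (the rewrite author's own statement) =====
-- stated objective: simpler
-- what changed: Replaces A's two-mode recursion that threads a 'chosen' string through the trie (one recursion frame per character, with a dispatch between traversal mode and expansion mode) by a single-phase recursion over the letter bag plus an iterative frontier 'descend' that follows a whole letter string at once ('.' expands the frontier over all children); bag decrement is inlined instead of the exception-raising remove_bag helper.
import Mathlib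
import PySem

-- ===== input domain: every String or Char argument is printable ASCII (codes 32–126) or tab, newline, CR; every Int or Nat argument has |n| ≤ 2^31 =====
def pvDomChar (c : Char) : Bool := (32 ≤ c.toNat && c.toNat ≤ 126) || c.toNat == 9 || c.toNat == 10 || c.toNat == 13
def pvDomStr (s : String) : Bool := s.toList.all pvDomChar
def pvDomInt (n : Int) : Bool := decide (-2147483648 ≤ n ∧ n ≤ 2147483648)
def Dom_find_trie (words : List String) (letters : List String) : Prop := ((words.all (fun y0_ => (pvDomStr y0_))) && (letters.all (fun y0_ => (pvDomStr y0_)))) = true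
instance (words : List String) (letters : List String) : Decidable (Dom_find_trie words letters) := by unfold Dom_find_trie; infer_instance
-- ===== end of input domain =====

-- B replaces A's two-mode rec (chosen-string threading through the trie) by a single-phase
-- recursion over the bag with an iterative multi-node `descend`; objective: simpler.
-- The mutable Python Trie is ported for both sides as a node pool (index 0 = root),
-- a node being (word?, association list of children in insertion order).

-- ===== PORT A =====
-- one step of `for letter in word:` in trie_from_list (membership test, insert, move)
def pvStepA (st : List (Option String × List (Char × Nat)) × Nat) (c : Char) :
    List (Option String × List (Char × Nat)) × Nat :=
  let node := st.1.getD st.2 (none, [])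
  match node.2.find? (fun p => p.1 = c) with
  | some p => (st.1, p.2)
  | none =>
      let j := st.1.length
      ((st.1.set st.2 (node.1, node.2 ++ [(c, j)])) ++ [(none, [])], j)

def pvBuildA (words : List String) : List (Option String × List (Char × Nat)) :=
  words.foldl (fun P w =>
    let st := w.toList.foldl pvStepA (P, 0)
    let node := st.1.getD st.2 (none, [])
    st.1.set st.2 (some w, node.2)) [(none, [])]

-- remove_bag; the `none` branch is Python's ValueError, unreachable from rec (e is a key of bag)
def pvRemoveBag (bag : PySem.Dict String Int) (e : String) : PySem.Dict String Int :=
  match bag.get? e with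
  | none => bag
  | some v => if v = 1 then bag.erase e else bag.insert e (v - 1)

-- rec of A; fuel is a totality guard only, spent exactly at each bag expansion
-- (each expansion removes one letter from the bag, so `letters.length + 1` is never exhausted)
def pvRecA (P : List (Option String × List (Char × Nat))) :
    Nat → Nat → List Char → PySem.Dict String Int → List String
  | fuel, i, c :: rest, bag =>
      if c = '.' then
        ((P.getD i (none, [])).2).flatMap (fun p => pvRecA P fuel p.2 rest bag)
      else
        match ((P.getD i (none, [])).2).find? (fun p => p.1 = c) with
        | some p => pvRecA P fuel p.2 rest bag
        | none => []
  | 0, _, [], _ => []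
  | fuel + 1, i, [], bag =>
      let out := match (P.getD i (none, [])).1 with
        | some w => [w]
        | none => []
      if bag.items = [] then out
      else out ++ bag.items.flatMap (fun kv => pvRecA P fuel i kv.1.toList (pvRemoveBag bag kv.1))
  termination_by fuel _ chosen _ => (fuel, chosen.length)

def find_trie (words : List String) (letters : List String) : List String :=
  pvRecA (pvBuildA words) (letters.length + 1) 0 [] (PySem.Dict.counter letters)

-- ===== PORT B =====
-- node[1].setdefault(ch, [None, {}]) step of B's builder
def pvStepB (st : List (Option String × List (Char × Nat)) × Nat) (c : Char) :
    List (Option String × List (Char × Nat)) × Nat :=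
  let node := st.1.getD st.2 (none, [])
  if h : (node.2.find? (fun p => p.1 = c)).isSome then
    (st.1, ((node.2.find? (fun p => p.1 = c)).get h).2)
  else
    ((st.1.set st.2 (node.1, node.2 ++ [(c, st.1.length)])) ++ [(none, [])], st.1.length)

def pvBuildB (words : List String) : List (Option String × List (Char × Nat)) :=
  words.foldl (fun P w =>
    let st := w.toList.foldl pvStepB (P, 0)
    let node := st.1.getD st.2 (none, [])
    st.1.set st.2 (some w, node.2)) [(none, [])]

-- descend: iterative frontier of nodes following the string s
def pvDescend (P : List (Option String × List (Char × Nat)))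
    (ns : List Nat) (s : List Char) : List Nat :=
  s.foldl (fun ns c =>
    if c = '.' then ns.flatMap (fun i => ((P.getD i (none, [])).2).map Prod.snd)
    else ns.filterMap (fun i => (((P.getD i (none, [])).2).find? (fun p => p.1 = c)).map Prod.snd)) ns

-- rec of B; same fuel discipline (spent at each bag expansion)
def pvRecB (P : List (Option String × List (Char × Nat))) :
    Nat → Nat → PySem.Dict String Int → List String
  | 0, _, _ => []
  | fuel + 1, i, bag =>
      let out := match (P.getD i (none, [])).1 with
        | some w => [w]
        | none => []
      out ++ bag.items.flatMap (fun kv =>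
        let rest := if kv.2 = 1 then bag.erase kv.1 else bag.insert kv.1 (kv.2 - 1)
        (pvDescend P [i] kv.1.toList).flatMap (fun n => pvRecB P fuel n rest))

def find_trie_alt (words : List String) (letters : List String) : List String :=
  pvRecB (pvBuildB words) (letters.length + 1) 0 (PySem.Dict.counter letters)

-- ===== PRECONDITION & SPEC =====
def Spec_find_trie (words : List String) (letters : List String) (out : List String) : Prop := out = find_trie_alt words letters
instance (words : List String) (letters : List String) (out : List String) : Decidable (Spec_find_trie words letters out) := by unfold Spec_find_trie; infer_instance

-- ===== CLAIM (what is proved, stated in full; the proofs are below) =====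
def Claim_equal_find_trie : Prop := ∀ (words : List String) (letters : List String), Dom_find_trie words letters → Spec_find_trie words letters (find_trie words letters)

-- ===== LEMMAS AND PROOFS =====

theorem pvStepB_eq_stepA (st : List (Option String × List (Char × Nat)) × Nat) (c : Char) :
    pvStepB st c = pvStepA st c := by
  unfold pvStepA pvStepB
  cases h : ((st.1.getD st.2 (none, [])).2).find? (fun p => p.1 = c) <;>
    · simp only [List.getD] at h ⊢
      simp [h]

theorem pvBuildB_eq_buildA (words : List String) : pvBuildB words = pvBuildA words := by
  unfold pvBuildA pvBuildB
  simp only [funext fun st => funext fun c => pvStepB_eq_stepA st c]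

theorem pv_nodup_keys_erase (d : PySem.Dict String Int) (k : String) (h : d.keys.Nodup) :
    (d.erase k).keys.Nodup := by
  have hs : (d.erase k).items.Sublist d.items := by
    simp only [PySem.Dict.erase]
    exact List.filter_sublist
  exact h.sublist (hs.map _)

theorem pv_flatMap_matchsnd {α β γ δ : Type} (xs : List α) (h : α → Option (β × γ))
    (g : γ → List δ) :
    xs.flatMap (fun x => (h x).elim [] (fun p => g p.2)) =
      (xs.filterMap (fun x => (h x).map Prod.snd)).flatMap g := by
  induction xs with
  | nil => rfl
  | cons x xs ih =>
      cases hx : h x <;> simp [List.flatMap_cons, hx, ih]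

-- the crux: A's chosen-threading DFS equals B's frontier descend followed by expansion
theorem pvDescend_spec (P : List (Option String × List (Char × Nat)))
    (fuel : Nat) (bag : PySem.Dict String Int) :
    ∀ (chosen : List Char) (ns : List Nat),
      ns.flatMap (fun i => pvRecA P fuel i chosen bag) =
        (pvDescend P ns chosen).flatMap (fun n => pvRecA P fuel n [] bag) := by
  intro chosen
  induction chosen with
  | nil => intro ns; rfl
  | cons c rest ih =>
      intro ns
      have hstep : pvDescend P ns (c :: rest) =
          pvDescend P (if c = '.' then ns.flatMap (fun i => ((P.getD i (none, [])).2).map Prod.snd)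
            else ns.filterMap (fun i =>
              (((P.getD i (none, [])).2).find? (fun p => p.1 = c)).map Prod.snd)) rest := by
        unfold pvDescend; rw [List.foldl_cons]
      by_cases hc : c = '.'
      · have hA : ∀ i : Nat, pvRecA P fuel i (c :: rest) bag =
            ((P.getD i (none, [])).2).flatMap (fun p => pvRecA P fuel p.2 rest bag) := by
          intro i; rw [pvRecA]; simp [hc]
        calc ns.flatMap (fun i => pvRecA P fuel i (c :: rest) bag)
            = ns.flatMap (fun i => (((P.getD i (none, [])).2).map Prod.snd).flatMap
                (fun j => pvRecA P fuel j rest bag)) := by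
              simp only [hA, List.flatMap_map]
          _ = (ns.flatMap (fun i => ((P.getD i (none, [])).2).map Prod.snd)).flatMap
                (fun j => pvRecA P fuel j rest bag) := (List.flatMap_assoc ..).symm
          _ = _ := by rw [hstep, if_pos hc, ih]
      · have hA : ∀ i : Nat, pvRecA P fuel i (c :: rest) bag =
            (((P.getD i (none, [])).2).find? (fun p => p.1 = c)).elim []
              (fun p => pvRecA P fuel p.2 rest bag) := by
          intro i
          rw [pvRecA]
          cases ((P.getD i (none, [])).2).find? (fun p => p.1 = c) <;> simp [hc]
        calc ns.flatMap (fun i => pvRecA P fuel i (c :: rest) bag)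
            = (ns.filterMap (fun i =>
                (((P.getD i (none, [])).2).find? (fun p => p.1 = c)).map Prod.snd)).flatMap
                (fun j => pvRecA P fuel j rest bag) := by
              simp only [hA]
              exact pv_flatMap_matchsnd ns
                (fun i => ((P.getD i (none, [])).2).find? (fun p => p.1 = c))
                (fun j => pvRecA P fuel j rest bag)
          _ = _ := by rw [hstep, if_neg hc, ih]

theorem pvRecA_nil_eq_recB (P : List (Option String × List (Char × Nat))) :
    ∀ (fuel : Nat) (i : Nat) (bag : PySem.Dict String Int), bag.keys.Nodup →
      pvRecA P fuel i [] bag = pvRecB P fuel i bag := by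
  intro fuel
  induction fuel with
  | zero => intro i bag _; rw [pvRecA, pvRecB]
  | succ fuel ih =>
      intro i bag hnd
      rw [pvRecA, pvRecB]
      by_cases hb : bag.items = []
      · simp [hb]
      · rw [if_neg hb]
        congr 1
        apply List.flatMap_congr
        intro kv hkv
        obtain ⟨k, v⟩ := kv
        have hget : bag.get? k = some v := (PySem.Dict.get?_eq_some_iff_mem_items bag k v hnd).mpr hkv
        have h1 : pvRemoveBag bag k =
            (if v = 1 then bag.erase k else bag.insert k (v - 1)) := by
          unfold pvRemoveBag; rw [hget]
        have hnd' : (if v = 1 then bag.erase k else bag.insert k (v - 1)).keys.Nodup := by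
          split
          · exact pv_nodup_keys_erase bag k hnd
          · exact PySem.Dict.nodup_keys_insert bag k (v - 1) hnd
        rw [h1]
        have hd := pvDescend_spec P fuel (if v = 1 then bag.erase k else bag.insert k (v - 1))
          k.toList [i]
        simp only [List.flatMap_cons, List.flatMap_nil, List.append_nil] at hd
        rw [hd]
        exact List.flatMap_congr fun n _ => ih n _ hnd'

theorem find_trie_eq (words letters : List String) :
    find_trie words letters = find_trie_alt words letters := by
  unfold find_trie find_trie_alt
  rw [pvBuildB_eq_buildA,
    pvRecA_nil_eq_recB _ _ _ _ (PySem.Dict.nodup_keys_counter letters)]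

-- ===== VERDICT (by name: the statement is the Claim_ definition above) =====
theorem find_trie_spec : Claim_equal_find_trie := by
  intro words letters _
  unfold Spec_find_trie
  exact find_trie_eq words letters
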